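-- pv_equiv track=rewrite | github.com/cgleach/w251_student_assignments | analyze_tweets.py | aggregate_hashtag_state
-- ===== SOURCE A (Python) =====
-- def aggregate_hashtag_state(new_values, current_state):
--     """
--     Checks if current key exists and if so sets current values
--     to the state; otherwise, initializes values to 0 and empty lists.
--     Then goes through and updates the overall state.
--     """
--     if current_state is not None:
--         (count,users,mentions) = current_state
--     else:
--         count, users, mentions = 0, [], []
--
--     if new_values is not None:
--         for tup in new_values:
--             count += tup[0]
--             users += tup[1]
--             mentions += tup[2]
--     return (count,users,mentions)
-- ===== SOURCE B (Python) =====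
-- def _reduce3(items, lo, hi):
--     # divide-and-conquer monoid reduction over items[lo:hi] (hi > lo)
--     if hi - lo == 1:
--         t = items[lo]
--         return (t[0], list(t[1]), list(t[2]))
--     mid = (lo + hi) // 2
--     lc, lu, lm = _reduce3(items, lo, mid)
--     rc, ru, rm = _reduce3(items, mid, hi)
--     return (lc + rc, lu + ru, lm + rm)
--
-- def aggregate_hashtag_state(new_values, current_state):
--     count, users, mentions = current_state if current_state is not None else (0, [], [])
--     items = list(new_values) if new_values is not None else []
--     if items:
--         c, u, m = _reduce3(items, 0, len(items))
--     else:
--         c, u, m = 0, [], []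
--     return (count + c, users + u, mentions + m)
-- ===== Notes on version B (the rewrite author's own statement) =====
-- stated objective: alternative
-- what changed: Replaces A's single left-to-right fused accumulation loop with a recursive divide-and-conquer reduction: snapshot new_values once, reduce it by pairwise halving over index ranges (correct because (+, list concatenation) is associative), then combine the reduced triple with the initial state in one final step.
import Mathlib
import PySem

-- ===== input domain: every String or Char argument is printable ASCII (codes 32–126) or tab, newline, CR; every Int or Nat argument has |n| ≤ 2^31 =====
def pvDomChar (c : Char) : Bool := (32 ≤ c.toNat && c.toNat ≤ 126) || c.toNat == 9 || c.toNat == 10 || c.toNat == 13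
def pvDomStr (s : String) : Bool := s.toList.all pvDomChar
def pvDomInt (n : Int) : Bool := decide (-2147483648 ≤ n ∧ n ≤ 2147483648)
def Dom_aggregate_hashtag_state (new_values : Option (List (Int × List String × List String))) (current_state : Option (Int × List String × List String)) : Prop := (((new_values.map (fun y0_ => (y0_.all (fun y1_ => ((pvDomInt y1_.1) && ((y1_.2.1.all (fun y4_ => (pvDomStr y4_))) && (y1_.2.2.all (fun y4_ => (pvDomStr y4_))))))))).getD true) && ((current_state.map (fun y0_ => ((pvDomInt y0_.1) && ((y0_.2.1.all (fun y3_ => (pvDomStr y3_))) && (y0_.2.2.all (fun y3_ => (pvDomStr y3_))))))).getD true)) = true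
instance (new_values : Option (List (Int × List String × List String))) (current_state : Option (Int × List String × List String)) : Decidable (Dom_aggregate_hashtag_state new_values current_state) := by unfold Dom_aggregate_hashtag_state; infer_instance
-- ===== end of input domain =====

-- B replaces A's fused left-to-right accumulation loop with a divide-and-conquer pairwise
-- reduction of the snapshotted items, combined with the initial state in one final step;
-- only the RETURN value is claimed equal (Python A mutates current_state's lists via +=, B does not).
-- ===== PORT A =====
def aggregate_hashtag_state (new_values : Option (List (Int × List String × List String))) (current_state : Option (Int × List String × List String)) : Int × List String × List String :=
  let s := match current_state with
    | some cs => cs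
    | none => (0, [], [])
  match new_values with
  | some vs =>
      vs.foldl (fun st tup => (st.1 + tup.1, st.2.1 ++ tup.2.1, st.2.2 ++ tup.2.2)) s
  | none => s

-- ===== PORT B =====
-- _reduce3(items, lo, hi) in Source B reduces the slice items[lo:hi]; here the slice is the list
-- argument itself, split at mid = len // 2 exactly as Python does.
def pvReduce3 : List (Int × List String × List String) → Int × List String × List String
  | [] => (0, [], [])          -- unreachable from the caller (Source B only calls with hi > lo)
  | [t] => t
  | x :: y :: rest =>
      let l := pvReduce3 ((x :: y :: rest).take ((x :: y :: rest).length / 2))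
      let r := pvReduce3 ((x :: y :: rest).drop ((x :: y :: rest).length / 2))
      (l.1 + r.1, l.2.1 ++ r.2.1, l.2.2 ++ r.2.2)
termination_by xs => xs.length
decreasing_by
  all_goals simp only [List.length_take, List.length_drop, List.length_cons]; omega

def aggregate_hashtag_state_alt (new_values : Option (List (Int × List String × List String))) (current_state : Option (Int × List String × List String)) : Int × List String × List String :=
  let s := match current_state with
    | some cs => cs
    | none => (0, [], [])
  let items := match new_values with
    | some vs => vs
    | none => []
  let r := if items.isEmpty then (0, [], []) else pvReduce3 items
  (s.1 + r.1, s.2.1 ++ r.2.1, s.2.2 ++ r.2.2)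

-- ===== PRECONDITION & SPEC =====
def Spec_aggregate_hashtag_state (new_values : Option (List (Int × List String × List String))) (current_state : Option (Int × List String × List String)) (out : Int × List String × List String) : Prop := out = aggregate_hashtag_state_alt new_values current_state
instance (new_values : Option (List (Int × List String × List String))) (current_state : Option (Int × List String × List String)) (out : Int × List String × List String) : Decidable (Spec_aggregate_hashtag_state new_values current_state out) := by unfold Spec_aggregate_hashtag_state; infer_instance

-- ===== CLAIM =====
def Claim_equal_aggregate_hashtag_state : Prop := ∀ (new_values : Option (List (Int × List String × List String))) (current_state : Option (Int × List String × List String)), Dom_aggregate_hashtag_state new_values current_state → Spec_aggregate_hashtag_state new_values current_state (aggregate_hashtag_state new_values current_state)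

-- ===== LEMMAS AND PROOFS =====
-- the flat characterisation both ports are proved against
def pvSpecTriple (xs : List (Int × List String × List String)) : Int × List String × List String :=
  ((xs.map (fun t => t.1)).sum, (xs.map (fun t => t.2.1)).flatten, (xs.map (fun t => t.2.2)).flatten)

theorem pvSpecTriple_append (a b : List (Int × List String × List String)) :
    pvSpecTriple (a ++ b)
      = ((pvSpecTriple a).1 + (pvSpecTriple b).1,
         (pvSpecTriple a).2.1 ++ (pvSpecTriple b).2.1,
         (pvSpecTriple a).2.2 ++ (pvSpecTriple b).2.2) := by
  simp [pvSpecTriple]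

theorem pvReduce3_eq (xs : List (Int × List String × List String)) :
    pvReduce3 xs = pvSpecTriple xs := by
  induction xs using pvReduce3.induct with
  | case1 => simp [pvReduce3, pvSpecTriple]
  | case2 t => simp [pvReduce3, pvSpecTriple]
  | case3 x y rest ihl ihr =>
      rw [pvReduce3]
      simp only at ihl ihr
      rw [ihl, ihr]
      have h := pvSpecTriple_append ((x :: y :: rest).take ((x :: y :: rest).length / 2))
        ((x :: y :: rest).drop ((x :: y :: rest).length / 2))
      rw [List.take_append_drop] at h
      rw [h]

theorem foldl_agg (vs : List (Int × List String × List String)) (s : Int × List String × List String) :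
    vs.foldl (fun st tup => (st.1 + tup.1, st.2.1 ++ tup.2.1, st.2.2 ++ tup.2.2)) s
      = (s.1 + (pvSpecTriple vs).1, s.2.1 ++ (pvSpecTriple vs).2.1, s.2.2 ++ (pvSpecTriple vs).2.2) := by
  induction vs generalizing s with
  | nil => simp [pvSpecTriple]
  | cons h t ih =>
      simp [List.foldl, ih, pvSpecTriple, List.append_assoc]
      ring

-- ===== VERDICT =====
theorem aggregate_hashtag_state_spec : Claim_equal_aggregate_hashtag_state := by
  intro nv cs _
  unfold Spec_aggregate_hashtag_state aggregate_hashtag_state aggregate_hashtag_state_alt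
  cases nv with
  | none => cases cs <;> simp
  | some vs =>
      cases vs with
      | nil => cases cs <;> simp
      | cons h t => cases cs <;> simp [foldl_agg, pvReduce3_eq, pvSpecTriple, Int.add_assoc]
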